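-- pv_equiv track=rewrite | github.com/dmitry-s-danilov/python_algorithms | lesson_3/task/problem_6_lib.py | my_func
-- ===== SOURCE A (Python) =====
-- def my_func(y):
--     """
--     Finds the sum of number array items
--     between the minimum and maximum elements,
--     excluding the minimum and maximum elements themselves.
--
--     Parameters:
--     y (list): a number array
--         is for to find the maximum and minimum elements
--         and calculate the sum of the items between them
--
--     Returns:
--     num: a sum of array items
--         between the minimum and maximum elements
--
--     Examples:
--     >>> my_func([1, 2, 3])
--     2
--     >>> my_func([2, 3, 1])
--
--     >>> my_func([3, 1, 2])
--
--     >>> my_func([3, 2, 1])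
--     2
--     >>> my_func([1, 2, 3, 4])
--     5
--     """
--
--     i, j = 0, 0
--     for k in range(1, len(y)):
--         if y[k] < y[i]:
--             i = k
--         elif y[k] > y[j]:
--             j = k
--     if abs(i - j) > 1:
--         r = (i + 1, j) if i < j else (j + 1, i)
--         s = 0
--         for k in range(*r):
--             s += y[k]
--         return s
-- ===== SOURCE B (Python) =====
-- def my_func(y):
--     if not y:
--         return None
--     def extremes(lo, hi):
--         # divide and conquer over index interval [lo, hi), hi - lo >= 1;
--         # returns (min, first argmin, max, first argmax)
--         if hi - lo == 1:
--             v = y[lo]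
--             return v, lo, v, lo
--         mid = (lo + hi) // 2
--         mn1, i1, mx1, j1 = extremes(lo, mid)
--         mn2, i2, mx2, j2 = extremes(mid, hi)
--         mn, i = (mn1, i1) if mn1 <= mn2 else (mn2, i2)
--         mx, j = (mx1, j1) if mx1 >= mx2 else (mx2, j2)
--         return mn, i, mx, j
--     _, i, _, j = extremes(0, len(y))
--     lo, hi = (i, j) if i < j else (j, i)
--     if hi - lo <= 1:
--         return None
--     pre = [0]
--     for v in y:
--         pre.append(pre[-1] + v)
--     return pre[hi] - pre[lo + 1]
-- ===== Notes on version B (the rewrite author's own statement) =====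
-- stated objective: alternative
-- what changed: A's fused linear scan that tracks argmin/argmax indices and then re-sums a slice by an index loop is replaced by a recursive divide-and-conquer computation of (min, first argmin, max, first argmax) over halves of the index interval, and the between-extremes sum is read off as a difference of two entries of a prefix-sum table built once.
import Mathlib
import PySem

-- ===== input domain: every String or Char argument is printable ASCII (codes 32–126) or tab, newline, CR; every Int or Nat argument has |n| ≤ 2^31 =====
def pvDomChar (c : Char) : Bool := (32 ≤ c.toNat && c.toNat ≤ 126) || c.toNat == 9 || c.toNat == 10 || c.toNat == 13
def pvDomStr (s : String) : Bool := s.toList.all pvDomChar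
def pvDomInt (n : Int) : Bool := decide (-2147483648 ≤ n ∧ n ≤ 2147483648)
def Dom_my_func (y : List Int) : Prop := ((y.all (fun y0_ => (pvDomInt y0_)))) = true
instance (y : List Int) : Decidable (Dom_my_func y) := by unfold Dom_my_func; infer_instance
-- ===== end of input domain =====

-- B replaces A's fused linear argmin/argmax scan and slice-summing loop by a recursive
-- divide-and-conquer computation of (min, first argmin, max, first argmax) plus a
-- prefix-sum table; objective: alternative (same O(n) cost, different algorithm).

-- ===== PORT A =====
-- loop body of A's fused scan; every index fed to pyGetD is in range, so the default 0 is never used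
def pvStepA (y : List Int) (ij : Int × Int) (k : Int) : Int × Int :=
  if PySem.List.pyGetD y k 0 < PySem.List.pyGetD y ij.1 0 then (k, ij.2)
  else if PySem.List.pyGetD y ij.2 0 < PySem.List.pyGetD y k 0 then (ij.1, k)
  else ij

def my_func (y : List Int) : Option Int :=
  let st := (PySem.List.pyRange 1 (y.length : Int)).foldl (pvStepA y) (0, 0)
  let i := st.1
  let j := st.2
  if 1 < |i - j| then
    let r := if i < j then (i + 1, j) else (j + 1, i)
    some ((PySem.List.pyRange r.1 r.2).foldl (fun s k => s + PySem.List.pyGetD y k 0) 0)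
  else
    none

-- ===== PORT B =====
-- Source B's recursive `extremes(lo, hi)`; Source B only ever calls it with lo < hi, where its
-- base case `hi - lo == 1` coincides with the guard `hi ≤ lo + 1` used here for termination
def pvExtremes (y : List Int) (lo hi : Nat) : Int × Nat × Int × Nat :=
  if hi ≤ lo + 1 then
    let v := PySem.List.pyGetD y (lo : Int) 0
    (v, lo, v, lo)
  else
    let mid := (lo + hi) / 2
    let e1 := pvExtremes y lo mid
    let e2 := pvExtremes y mid hi
    let m1 := if e1.1 ≤ e2.1 then (e1.1, e1.2.1) else (e2.1, e2.2.1)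
    let m2 := if e2.2.2.1 ≤ e1.2.2.1 then (e1.2.2.1, e1.2.2.2) else (e2.2.2.1, e2.2.2.2)
    (m1.1, m1.2, m2.1, m2.2)
termination_by hi - lo
decreasing_by all_goals omega

def my_func_alt (y : List Int) : Option Int :=
  if y = [] then none
  else
    let e := pvExtremes y 0 y.length
    let i := e.2.1
    let j := e.2.2.2
    let p := if i < j then (i, j) else (j, i)
    if p.2 - p.1 ≤ 1 then none
    else
      let pre := y.foldl (fun acc v => acc ++ [PySem.List.pyGetD acc (-1) 0 + v]) [0]
      some (PySem.List.pyGetD pre (p.2 : Int) 0 - PySem.List.pyGetD pre ((p.1 : Int) + 1) 0)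

-- ===== PRECONDITION & SPEC =====
def Spec_my_func (y : List Int) (out : Option Int) : Prop := out = my_func_alt y
instance (y : List Int) (out : Option Int) : Decidable (Spec_my_func y out) := by unfold Spec_my_func; infer_instance

-- ===== CLAIM =====
def Claim_equal_my_func : Prop := ∀ (y : List Int), Dom_my_func y → Spec_my_func y (my_func y)

-- ===== LEMMAS AND PROOFS =====

lemma pvRangeNil (a b : Int) (h : b ≤ a) : PySem.List.pyRange a b = [] := by
  unfold PySem.List.pyRange
  simp only [if_pos Int.zero_lt_one]
  rw [if_neg (by omega), if_neg (by omega)]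
  simp

-- sum accumulated over range(a, b) of y[k] equals the sum of the sublist y[a:b]
lemma pvSumRange (y : List Int) : ∀ (b : Nat), b ≤ y.length → ∀ (a : Nat),
    (PySem.List.pyRange (a : Int) (b : Int)).foldl (fun s k => s + PySem.List.pyGetD y k 0) 0
      = (List.take (b - a) (List.drop a y)).sum := by
  intro b
  induction b with
  | zero =>
    intro _ a
    rw [pvRangeNil _ _ (by exact_mod_cast Nat.zero_le a)]
    simp
  | succ b ih =>
    intro hb a
    by_cases hab : a ≤ b
    · have h1 : ((b + 1 : Nat) : Int) = (b : Int) + 1 := by push_cast; ring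
      rw [h1, PySem.List.pyRange_one_succ_right (by exact_mod_cast hab), List.foldl_append]
      rw [ih (by omega) a]
      simp only [List.foldl_cons, List.foldl_nil]
      have hbl : b < y.length := by omega
      rw [PySem.List.pyGetD_natCast]
      have h2 : b + 1 - a = (b - a) + 1 := by omega
      rw [h2, List.take_add_one]
      have h3 : (List.drop a y)[b - a]? = some y[b] := by
        rw [List.getElem?_drop]
        rw [List.getElem?_eq_getElem (by omega)]
        congr 1
        congr 1
        omega
      rw [h3]
      simp [List.getElem?_eq_getElem hbl]
    · rw [pvRangeNil _ _ (by exact_mod_cast by omega)]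
      have : b + 1 - a = 0 := by omega
      simp [this]

-- A's loop state after scanning indices 1..m-1 is the (first) argmin/argmax index pair of the prefix of length m
lemma pvLoopA_inv (y : List Int) : ∀ (m : Nat), 1 ≤ m → m ≤ y.length →
    ∃ i j : Nat, (PySem.List.pyRange 1 (m : Int)).foldl (pvStepA y) (0, 0) = ((i : Int), (j : Int)) ∧
      i < m ∧ j < m ∧
      (∀ k, k < m → y.getD i 0 ≤ y.getD k 0) ∧ (∀ k, k < i → y.getD i 0 < y.getD k 0) ∧
      (∀ k, k < m → y.getD k 0 ≤ y.getD j 0) ∧ (∀ k, k < j → y.getD k 0 < y.getD j 0) := by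
  intro m hm
  induction m, hm using Nat.le_induction with
  | base =>
    intro _
    refine ⟨0, 0, ?_, by omega, by omega, ?_, ?_, ?_, ?_⟩
    · rw [Nat.cast_one, pvRangeNil 1 1 le_rfl]; rfl
    all_goals intro k hk
    · have : k = 0 := by omega
      subst this; exact le_rfl
    · omega
    · have : k = 0 := by omega
      subst this; exact le_rfl
    · omega
  | succ m hm ih =>
    intro hlen
    obtain ⟨i, j, hfold, hi, hj, hminle, hminf, hmaxle, hmaxf⟩ := ih (by omega)
    have hcast : ((m + 1 : Nat) : Int) = (m : Int) + 1 := by push_cast; ring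
    rw [hcast, PySem.List.pyRange_one_succ_right (by exact_mod_cast hm), List.foldl_append,
      hfold, List.foldl_cons, List.foldl_nil]
    unfold pvStepA
    simp only [PySem.List.pyGetD_natCast]
    split_ifs with h1 h2
    · refine ⟨m, j, rfl, by omega, by omega, ?_, ?_, ?_, ?_⟩
      · intro k hk
        rcases Nat.lt_succ_iff_lt_or_eq.mp hk with h | h
        · exact le_of_lt (h1.trans_le (hminle k h))
        · subst h; exact le_rfl
      · intro k hk
        exact h1.trans_le (hminle k (by omega))
      · intro k hk
        rcases Nat.lt_succ_iff_lt_or_eq.mp hk with h | h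
        · exact hmaxle k h
        · subst h; exact le_of_lt (h1.trans_le (hmaxle i hi))
      · exact hmaxf
    · push Not at h1
      refine ⟨i, m, rfl, by omega, by omega, ?_, ?_, ?_, ?_⟩
      · intro k hk
        rcases Nat.lt_succ_iff_lt_or_eq.mp hk with h | h
        · exact hminle k h
        · subst h; exact h1
      · exact hminf
      · intro k hk
        rcases Nat.lt_succ_iff_lt_or_eq.mp hk with h | h
        · exact (hmaxle k h).trans (le_of_lt h2)
        · subst h; exact le_rfl
      · intro k hk
        exact (hmaxle k hk).trans_lt h2
    · push Not at h1 h2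
      refine ⟨i, j, rfl, by omega, by omega, ?_, hminf, ?_, hmaxf⟩
      · intro k hk
        rcases Nat.lt_succ_iff_lt_or_eq.mp hk with h | h
        · exact hminle k h
        · subst h; exact h1
      · intro k hk
        rcases Nat.lt_succ_iff_lt_or_eq.mp hk with h | h
        · exact hmaxle k h
        · subst h; exact h2

-- B's divide-and-conquer computes the value and FIRST index of the min and max of y over [lo, hi)
lemma pvExtremes_spec (y : List Int) : ∀ (n lo hi : Nat), hi - lo = n → lo < hi → hi ≤ y.length →
    let e := pvExtremes y lo hi
    (lo ≤ e.2.1 ∧ e.2.1 < hi ∧ e.1 = y.getD e.2.1 0 ∧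
      (∀ k, lo ≤ k → k < hi → e.1 ≤ y.getD k 0) ∧ (∀ k, lo ≤ k → k < e.2.1 → e.1 < y.getD k 0)) ∧
    (lo ≤ e.2.2.2 ∧ e.2.2.2 < hi ∧ e.2.2.1 = y.getD e.2.2.2 0 ∧
      (∀ k, lo ≤ k → k < hi → y.getD k 0 ≤ e.2.2.1) ∧ (∀ k, lo ≤ k → k < e.2.2.2 → y.getD k 0 < e.2.2.1)) := by
  intro n
  induction n using Nat.strong_induction_on with
  | _ n ih =>
    intro lo hi hn hlt hle
    rw [pvExtremes]
    by_cases hbase : hi ≤ lo + 1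
    · rw [if_pos hbase]
      simp only
      have hlo : hi = lo + 1 := by omega
      refine ⟨⟨le_rfl, by omega, by simp, ?_, ?_⟩, ⟨le_rfl, by omega, by simp, ?_, ?_⟩⟩
      all_goals intro k hk1 hk2
      · have : k = lo := by omega
        subst this; simp
      · omega
      · have : k = lo := by omega
        subst this; simp
      · omega
    · rw [if_neg hbase]
      simp only
      set mid := (lo + hi) / 2 with hmiddef
      set e1 := pvExtremes y lo mid with he1
      set e2 := pvExtremes y mid hi with he2
      have hmid1 : lo < mid := by omega
      have hmid2 : mid < hi := by omega
      obtain ⟨⟨ha1, ha2, ha3, ha4, ha5⟩, ⟨hb1, hb2, hb3, hb4, hb5⟩⟩ :=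
        ih (mid - lo) (by omega) lo mid rfl hmid1 (by omega)
      obtain ⟨⟨hc1, hc2, hc3, hc4, hc5⟩, ⟨hd1, hd2, hd3, hd4, hd5⟩⟩ :=
        ih (hi - mid) (by omega) mid hi rfl hmid2 hle
      simp only [← he1, ← he2] at ha1 ha2 ha3 ha4 ha5 hb1 hb2 hb3 hb4 hb5 hc1 hc2 hc3 hc4 hc5 hd1 hd2 hd3 hd4 hd5
      constructor
      · -- min side
        by_cases hm : e1.1 ≤ e2.1
        · rw [if_pos hm]
          refine ⟨ha1, by omega, ha3, ?_, ?_⟩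
          · intro k hk1 hk2
            by_cases h : k < mid
            · exact ha4 k hk1 h
            · exact hm.trans (hc4 k (by omega) hk2)
          · intro k hk1 hk2
            exact ha5 k hk1 hk2
        · rw [if_neg hm]
          push Not at hm
          refine ⟨by omega, hc2, hc3, ?_, ?_⟩
          · intro k hk1 hk2
            by_cases h : k < mid
            · exact le_of_lt (hm.trans_le (ha4 k hk1 h))
            · exact hc4 k (by omega) hk2
          · intro k hk1 hk2
            by_cases h : k < mid
            · exact hm.trans_le (ha4 k hk1 h)
            · exact hc5 k (by omega) hk2
      · -- max side
        by_cases hm : e2.2.2.1 ≤ e1.2.2.1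
        · rw [if_pos hm]
          refine ⟨hb1, by omega, hb3, ?_, ?_⟩
          · intro k hk1 hk2
            by_cases h : k < mid
            · exact hb4 k hk1 h
            · exact (hd4 k (by omega) hk2).trans hm
          · intro k hk1 hk2
            exact hb5 k hk1 hk2
        · rw [if_neg hm]
          push Not at hm
          refine ⟨by omega, hd2, hd3, ?_, ?_⟩
          · intro k hk1 hk2
            by_cases h : k < mid
            · exact (hb4 k hk1 h).trans (le_of_lt hm)
            · exact hd4 k (by omega) hk2
          · intro k hk1 hk2
            by_cases h : k < mid
            · exact (hb4 k hk1 h).trans_lt hm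
            · exact hd5 k (by omega) hk2

-- the prefix-sum list built by Source B's loop is the table of partial sums
lemma pvPreList (y : List Int) :
    y.foldl (fun acc v => acc ++ [PySem.List.pyGetD acc (-1) 0 + v]) [0]
      = (List.range (y.length + 1)).map (fun k => (y.take k).sum) := by
  induction y using List.reverseRecOn with
  | nil => simp [List.range_succ]
  | append_singleton y v ih =>
    rw [List.foldl_append, ih, List.foldl_cons, List.foldl_nil]
    have hsplit : List.range (y.length + 1) = List.range y.length ++ [y.length] :=
      List.range_succ
    rw [hsplit, List.map_append]
    simp only [List.map_cons, List.map_nil]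
    rw [PySem.List.pyGetD_neg_one_append_singleton]
    have hlast : (y.take y.length).sum + v = ((y ++ [v]).take (y.length + 1)).sum := by
      simp
    have hlen : (y ++ [v]).length = y.length + 1 := by simp
    rw [hlen, List.range_succ, List.map_append]
    simp only [List.map_cons, List.map_nil]
    rw [List.range_succ, List.map_append]
    simp only [List.map_cons, List.map_nil]
    have hpref : ∀ k ∈ List.range y.length,
        ((y ++ [v]).take k).sum = (y.take k).sum := by
      intro k hk
      rw [List.mem_range] at hk
      rw [List.take_append_of_le_length (by omega)]
    have htak : ((y ++ [v]).take y.length).sum = (y.take y.length).sum := by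
      rw [List.take_append_of_le_length le_rfl]
    rw [List.map_congr_left hpref, htak]
    simp

-- entry h of the prefix-sum list is the sum of the first h elements of y
lemma pvPreGet (y : List Int) (h : Nat) (hh : h ≤ y.length) :
    PySem.List.pyGetD (y.foldl (fun acc v => acc ++ [PySem.List.pyGetD acc (-1) 0 + v]) [0]) (h : Int) 0
      = (y.take h).sum := by
  rw [pvPreList, PySem.List.pyGetD_natCast]
  have hlt : h < ((List.range (y.length + 1)).map (fun k => (y.take k).sum)).length := by
    simp; omega
  rw [List.getD_eq_getElem _ _ hlt, List.getElem_map, List.getElem_range]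

-- difference of two prefix sums is the sum of the strictly-between sublist
lemma pvPreDiff (y : List Int) (lo hi : Nat) (h1 : lo + 1 ≤ hi) (_h2 : hi ≤ y.length) :
    (List.take (hi - (lo + 1)) (List.drop (lo + 1) y)).sum
      = (y.take hi).sum - (y.take (lo + 1)).sum := by
  have h3 : y.take hi = y.take (lo + 1) ++ List.take (hi - (lo + 1)) (List.drop (lo + 1) y) := by
    conv_lhs => rw [show hi = (lo + 1) + (hi - (lo + 1)) from by omega]
    rw [List.take_add]
  rw [h3, List.sum_append]
  ring

-- ===== VERDICT =====
theorem my_func_spec : Claim_equal_my_func := by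
  intro y _
  unfold Spec_my_func
  by_cases hy : y = []
  · subst hy; decide
  · unfold my_func my_func_alt
    rw [if_neg hy]
    have hlen : 1 ≤ y.length := by
      cases y with
      | nil => exact absurd rfl hy
      | cons a l => simp
    obtain ⟨i, j, hfold, hi, hj, hminle, hminf, hmaxle, hmaxf⟩ := pvLoopA_inv y y.length hlen le_rfl
    obtain ⟨⟨_, hb2, hb3, hb4, hb5⟩, ⟨_, hc2, hc3, hc4, hc5⟩⟩ :=
      pvExtremes_spec y y.length 0 y.length rfl (by omega) le_rfl
    set e := pvExtremes y 0 y.length with he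
    -- B's first argmin index equals A's
    have hieq : e.2.1 = i := by
      rcases lt_trichotomy e.2.1 i with h | h | h
      · exact absurd ((hb3 ▸ hb4 i (Nat.zero_le i) hi).trans_lt (hminf e.2.1 h)) (lt_irrefl _)
      · exact h
      · exact absurd ((hminle e.2.1 hb2).trans_lt (hb3 ▸ hb5 i (Nat.zero_le i) h)) (lt_irrefl _)
    -- B's first argmax index equals A's
    have hjeq : e.2.2.2 = j := by
      rcases lt_trichotomy e.2.2.2 j with h | h | h
      · exact absurd ((hmaxf e.2.2.2 h).trans_le (hc3 ▸ hc4 j (Nat.zero_le j) hj)) (lt_irrefl _)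
      · exact h
      · exact absurd ((hc3 ▸ hc5 j (Nat.zero_le j) h).trans_le (hmaxle e.2.2.2 hc2)) (lt_irrefl _)
    simp only [hfold, hieq, hjeq]
    rcases lt_trichotomy i j with hij | hij | hij
    · have hij' : (i : Int) < (j : Int) := by exact_mod_cast hij
      rw [if_pos hij]
      by_cases hgt : 1 < j - i
      · rw [if_pos (by rw [abs_sub_comm, abs_of_nonneg (by omega)]; omega),
          if_neg (by omega : ¬ (j - i ≤ 1))]
        simp only [if_pos hij']
        have hc : ((i : Int) + 1) = ((i + 1 : Nat) : Int) := by push_cast; ring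
        rw [hc, pvSumRange y j (le_of_lt hj) (i + 1),
          pvPreGet y j (le_of_lt hj), pvPreGet y (i + 1) (by omega),
          pvPreDiff y i j (by omega) (le_of_lt hj)]
      · rw [if_neg (by rw [abs_sub_comm, abs_of_nonneg (by omega)]; omega),
          if_pos (by omega : j - i ≤ 1)]
    · subst hij
      rw [if_neg (lt_irrefl i), if_neg (by simp : ¬ (1:Int) < |(i : Int) - (i : Int)|),
        if_pos (by omega : i - i ≤ 1)]
    · have hij' : ¬ (i : Int) < (j : Int) := by exact_mod_cast not_lt.mpr hij.le
      rw [if_neg (not_lt.mpr hij.le)]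
      by_cases hgt : 1 < i - j
      · rw [if_pos (by rw [abs_of_nonneg (by omega)]; omega),
          if_neg (by omega : ¬ (i - j ≤ 1))]
        simp only [if_neg hij']
        have hc : ((j : Int) + 1) = ((j + 1 : Nat) : Int) := by push_cast; ring
        rw [hc, pvSumRange y i (le_of_lt hi) (j + 1),
          pvPreGet y i (le_of_lt hi), pvPreGet y (j + 1) (by omega),
          pvPreDiff y j i (by omega) (le_of_lt hi)]
      · rw [if_neg (by rw [abs_of_nonneg (by omega)]; omega),
          if_pos (by omega : i - j ≤ 1)]
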